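-- pv_equiv track=rewrite | github.com/vwainman/wordle_pygame | miscellaneous.py | is_viable_duplicate
-- ===== SOURCE A (Python) =====
-- SAME_LEN_REQ_OUTPUT: str = "guess must be the same length as answer"
--
-- def is_viable_duplicate(guess: str, letter_i: int, answer: str) -> bool:
--     """According to the colour, check to see if the duplicate letter is viable"""
--
--     duplicate_letter: str = guess[letter_i]
--     n_greens: int = n_greens_with_letter(guess, duplicate_letter, answer)
--     n_possible_yellows: int = answer.count(duplicate_letter) - n_greens
--     i: int = 0
--     while n_possible_yellows > 0 and i <= letter_i:
--         if guess[i] == duplicate_letter and duplicate_letter != answer[i]: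
--             n_possible_yellows -= 1
--             if i == letter_i:
--                 return True
--         i += 1
--     return False
--
-- def n_greens_with_letter(guess: str, duplicate_letter: str, answer: str) -> int:
--     """count the number of correctly positioned occurences for a particular letter"""
--     if len(guess) != len(answer):
--         raise ValueError(SAME_LEN_REQ_OUTPUT)
--
--     count: int = 0
--     for i in range(len(guess)):
--         if guess[i] == duplicate_letter and answer[i] == duplicate_letter:
--             count += 1
--     return count
-- ===== SOURCE B (Python) =====
-- SAME_LEN_REQ_OUTPUT: str = "guess must be the same length as answer"
--
-- def is_viable_duplicate(guess: str, letter_i: int, answer: str) -> bool: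
--     """Rank-vs-budget reformulation: the duplicate at letter_i is viable iff
--     letter_i is among the first `budget` yellow-eligible positions."""
--     duplicate_letter = guess[letter_i]
--     if len(guess) != len(answer):
--         raise ValueError(SAME_LEN_REQ_OUTPUT)
--     n_greens = sum(1 for g, a in zip(guess, answer)
--                    if g == duplicate_letter and a == duplicate_letter)
--     budget = answer.count(duplicate_letter) - n_greens
--     yellow_positions = [i for i, (g, a) in enumerate(zip(guess, answer))
--                         if g == duplicate_letter and a != duplicate_letter]
--     return letter_i in yellow_positions[:budget]
-- ===== Notes on version B (the rewrite author's own statement) =====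
-- stated objective: simpler
-- what changed: Replaces A's stateful while-loop that decrements a yellow budget and early-returns with a declarative formulation: collect the yellow-eligible positions once and test whether letter_i is among the first `budget` of them.
-- outside the precondition, e.g. on is_viable_duplicate('ab', 1, 'abc'): A raises ValueError, B raises ValueError; on is_viable_duplicate('ab', 5, 'ab'): A raises IndexError, B raises IndexError
import Mathlib
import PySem

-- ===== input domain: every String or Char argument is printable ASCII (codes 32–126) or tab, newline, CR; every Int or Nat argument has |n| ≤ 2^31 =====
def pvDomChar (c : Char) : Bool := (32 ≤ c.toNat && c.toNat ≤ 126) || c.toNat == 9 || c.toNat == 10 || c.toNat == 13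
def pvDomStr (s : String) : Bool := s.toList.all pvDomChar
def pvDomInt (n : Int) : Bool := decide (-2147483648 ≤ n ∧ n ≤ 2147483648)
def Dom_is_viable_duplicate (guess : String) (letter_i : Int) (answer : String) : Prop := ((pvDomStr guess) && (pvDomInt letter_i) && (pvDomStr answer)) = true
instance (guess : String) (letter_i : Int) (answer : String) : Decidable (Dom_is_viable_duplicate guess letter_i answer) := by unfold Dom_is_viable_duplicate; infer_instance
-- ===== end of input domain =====

-- B replaces A's stateful decrement-and-early-return scan by "letter_i is among the
-- first `budget` yellow-eligible positions" (objective: simpler); equivalence is on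
-- the return value, proved on Pre_ (no exception raised).

-- ===== PORT A =====
-- helper n_greens_with_letter; `none` = the ValueError on a length mismatch (excluded by Pre_).
-- guess[i]/answer[i] for i in range(len(guess)) never raise there, so getD is exact.
def n_greens_with_letter (guess : String) (dup : Char) (answer : String) : Option Int :=
  if guess.toList.length ≠ answer.toList.length then none
  else some ((List.range guess.toList.length).foldl
    (fun c i => if guess.toList.getD i ' ' == dup && answer.toList.getD i ' ' == dup then c + 1 else c) 0)

-- A's while-loop; the `| _, _ => false` arm is Python's IndexError, unreachable once
-- guess[letter_i] succeeded (Pre_ keeps letter_i in range).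
def pv_aLoop (gl al : List Char) (dup : Char) (letter_i : Int) (np : Int) (i : Nat) : Bool :=
  if _h : np > 0 ∧ (i : Int) ≤ letter_i then
    match PySem.List.pyGet? gl (i : Int), PySem.List.pyGet? al (i : Int) with
    | some g, some a =>
      if g == dup && dup != a then
        if (i : Int) = letter_i then true
        else pv_aLoop gl al dup letter_i (np - 1) (i + 1)
      else pv_aLoop gl al dup letter_i np (i + 1)
    | _, _ => false
  else false
termination_by (letter_i + 1 - (i : Int)).toNat
decreasing_by all_goals omega

-- answer.count(duplicate_letter): the needle is the 1-character string guess[letter_i],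
-- so Python's substring count is exactly the character count (PySem.List.count).
def is_viable_duplicate (guess : String) (letter_i : Int) (answer : String) : Bool :=
  match PySem.Str.pyGet? guess letter_i with
  | none => false   -- IndexError on guess[letter_i]: excluded by Pre_
  | some dup =>
    match n_greens_with_letter guess dup answer with
    | none => false -- ValueError: excluded by Pre_
    | some ng =>
      let np : Int := (PySem.List.count answer.toList dup : Int) - ng
      pv_aLoop guess.toList answer.toList dup letter_i np 0

-- ===== PORT B =====
def is_viable_duplicate_alt (guess : String) (letter_i : Int) (answer : String) : Bool :=
  match PySem.Str.pyGet? guess letter_i with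
  | none => false   -- IndexError on guess[letter_i]: excluded by Pre_
  | some dup =>
    if guess.toList.length ≠ answer.toList.length then false  -- ValueError: excluded by Pre_
    else
      let pairs := guess.toList.zip answer.toList
      let n_greens : Int := ((pairs.filter (fun p => p.1 == dup && p.2 == dup)).length : Int)
      let budget : Int := (PySem.List.count answer.toList dup : Int) - n_greens
      let yellow_positions : List Int :=
        ((PySem.List.enumerate pairs 0).filter (fun pr => pr.2.1 == dup && pr.2.2 != dup)).map (·.1)
      decide (letter_i ∈ PySem.List.slice yellow_positions none (some budget))

-- ===== PRECONDITION & SPEC =====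
-- Pre_: exactly the inputs where A returns (no ValueError from the length check,
-- no IndexError from guess[letter_i]).
def Pre_is_viable_duplicate (guess : String) (letter_i : Int) (answer : String) : Prop :=
  guess.toList.length = answer.toList.length ∧ PySem.Raise.InRange guess.toList.length letter_i
instance (guess : String) (letter_i : Int) (answer : String) : Decidable (Pre_is_viable_duplicate guess letter_i answer) := by unfold Pre_is_viable_duplicate; infer_instance

def pvWitness_is_viable_duplicate : String × Int × String := ("aba", 2, "bab")

def Spec_is_viable_duplicate (guess : String) (letter_i : Int) (answer : String) (out : Bool) : Prop := out = is_viable_duplicate_alt guess letter_i answer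
instance (guess : String) (letter_i : Int) (answer : String) (out : Bool) : Decidable (Spec_is_viable_duplicate guess letter_i answer out) := by unfold Spec_is_viable_duplicate; infer_instance

-- ===== CLAIM (what is proved, stated in full; the proofs are below) =====
def Claim_equal_is_viable_duplicate : Prop := ∀ (guess : String) (letter_i : Int) (answer : String), Dom_is_viable_duplicate guess letter_i answer → Pre_is_viable_duplicate guess letter_i answer → Spec_is_viable_duplicate guess letter_i answer (is_viable_duplicate guess letter_i answer)

-- ===== LEMMAS AND PROOFS =====

theorem pv_witness_ok :
    Dom_is_viable_duplicate (pvWitness_is_viable_duplicate.1) (pvWitness_is_viable_duplicate.2.1) (pvWitness_is_viable_duplicate.2.2) ∧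
    Pre_is_viable_duplicate (pvWitness_is_viable_duplicate.1) (pvWitness_is_viable_duplicate.2.1) (pvWitness_is_viable_duplicate.2.2) := by
  decide

-- A's helper count (as a countP over range) equals B's zip-filter count.
theorem pv_count_range_eq_zip (dup : Char) :
    ∀ (gl al : List Char), gl.length = al.length →
    (List.range gl.length).countP (fun i => gl.getD i ' ' == dup && al.getD i ' ' == dup)
      = ((gl.zip al).filter (fun p => p.1 == dup && p.2 == dup)).length := by
  intro gl
  induction gl with
  | nil => intro al h; simp
  | cons g gl ih =>
    intro al h
    cases al with
    | nil => simp at h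
    | cons a al =>
      simp only [List.length_cons, List.range_succ_eq_map, List.countP_cons,
        List.countP_map, List.zip_cons_cons, List.filter_cons,
        Function.comp_def, List.getD_cons_succ, List.getD_cons_zero]
      rw [ih al (by simp only [List.length_cons] at h; omega)]
      by_cases hg : (g == dup && a == dup) = true
      · simp [hg]
      · simp [hg]

theorem pv_greens_le_count (dup : Char) :
    ∀ (gl al : List Char),
    ((gl.zip al).filter (fun p => p.1 == dup && p.2 == dup)).length ≤ al.count dup := by
  intro gl
  induction gl with
  | nil => intro al; simp
  | cons g gl ih =>
    intro al
    cases al with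
    | nil => simp
    | cons a al =>
      have := ih al
      simp only [List.zip_cons_cons, List.filter_cons, List.count_cons]
      by_cases h1 : g = dup <;> by_cases h2 : a = dup <;>
        simp [beq_iff_eq, h1, h2] <;> omega

-- B's enumerate-zip-filter-map list, rephrased as a filtered index range.
theorem pv_enum_filter {a : Type} [Inhabited a] (q : a → Bool) :
    ∀ (xs : List a) (s : Nat),
    ((PySem.List.enumerate xs (s : Int)).filter (fun pr => q pr.2)).map (·.1)
      = ((List.range xs.length).filter (fun j => q (xs.getD j default))).map
          (fun j => ((s + j : Nat) : Int)) := by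
  intro xs
  induction xs with
  | nil => intro s; simp [PySem.List.enumerate_nil]
  | cons x xs ih =>
    intro s
    rw [PySem.List.enumerate_cons]
    have hcast : (s : Int) + 1 = ((s + 1 : Nat) : Int) := by push_cast; ring
    rw [hcast]
    have htail :
        ((PySem.List.enumerate xs ((s + 1 : Nat) : Int)).filter (fun pr => q pr.2)).map (·.1)
          = (((List.range xs.length).map Nat.succ).filter
              (fun j => q ((x :: xs).getD j default))).map (fun j => ((s + j : Nat) : Int)) := by
      rw [ih (s + 1), List.filter_map, List.map_map]
      have h1 : ∀ j ∈ List.range xs.length,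
          ((fun j => q ((x :: xs).getD j default)) ∘ Nat.succ) j
            = (fun j => q (xs.getD j default)) j := by
        intro j hj; simp [Function.comp]
      rw [List.filter_congr h1]
      apply List.map_congr_left
      intro j hj
      simp only [Function.comp_apply]
      omega
    simp only [List.length_cons, List.range_succ_eq_map, List.filter_cons,
      List.getD_cons_zero]
    by_cases hq : q x = true
    · rw [if_pos hq, if_pos hq, List.map_cons, List.map_cons, htail]
      simp
    · rw [if_neg hq, if_neg hq, htail]

-- Characterisation of A's while-loop (0 ≤ letter_i = Lt < len): it answers whether
-- Lt is among the first np yellow-eligible positions in [i, Lt].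
theorem pv_aLoop_char (gl al : List Char) (dup : Char) (Lt : Nat)
    (hlen : gl.length = al.length) (hLt : Lt < gl.length) :
    ∀ (k i : Nat) (np : Int), i + k = Lt + 1 →
    pv_aLoop gl al dup (Lt : Int) np i =
      decide ((Lt : Int) ∈ (((List.range' i k).filter
          (fun j => gl.getD j ' ' == dup && al.getD j ' ' != dup)).map
          (fun j : Nat => (j : Int))).take np.toNat) := by
  intro k
  induction k with
  | zero =>
    intro i np hik
    rw [pv_aLoop, dif_neg (by rintro ⟨h1, h2⟩; omega)]
    simp
  | succ k ih =>
    intro i np hik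
    have hiLt : i ≤ Lt := by omega
    have hin : i < gl.length := by omega
    have hina : i < al.length := by omega
    rw [pv_aLoop]
    by_cases hnp : np > 0
    · rw [dif_pos ⟨hnp, by omega⟩]
      rw [PySem.List.pyGet?_natCast, PySem.List.pyGet?_natCast,
        List.getElem?_eq_getElem hin, List.getElem?_eq_getElem hina]
      rw [List.range'_succ, List.filter_cons]
      have hgg : gl.getD i ' ' = gl[i] := List.getD_eq_getElem gl ' ' hin
      have hga : al.getD i ' ' = al[i] := List.getD_eq_getElem al ' ' hina
      have hcomm : (dup != al[i]) = (al[i] != dup) := by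
        simp [bne, eq_comm]
      split
      case _ g a hg ha =>
        obtain rfl : gl[i] = g := Option.some.inj hg
        obtain rfl : al[i] = a := Option.some.inj ha
        by_cases hcond : (gl[i] == dup && al[i] != dup) = true
        · have hc' : (gl[i] == dup && dup != al[i]) = true := by
            rw [hcomm]; exact hcond
          have hPi : (gl.getD i ' ' == dup && al.getD i ' ' != dup) = true := by
            rw [hgg, hga]; exact hcond
          rw [if_pos hc', if_pos hPi]
          have hm : np.toNat = (np - 1).toNat + 1 := by omega
          rw [List.map_cons, hm, List.take_succ_cons]
          by_cases hiL : (i : Int) = (Lt : Int)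
          · rw [if_pos hiL]
            simp [hiL.symm]
          · rw [if_neg hiL, ih (i + 1) (np - 1) (by omega)]
            simp only [List.mem_cons, decide_eq_decide]
            constructor
            · exact Or.inr
            · rintro (h | h)
              · exact absurd h.symm hiL
              · exact h
        · have hc' : ¬(gl[i] == dup && dup != al[i]) = true := by
            rw [hcomm]; exact hcond
          have hPi : ¬(gl.getD i ' ' == dup && al.getD i ' ' != dup) = true := by
            rw [hgg, hga]; exact hcond
          rw [if_neg hc', if_neg hPi]
          exact ih (i + 1) np (by omega)
      case _ h =>
        exact (h gl[i] al[i] rfl rfl).elim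
    · rw [dif_neg (by rintro ⟨h1, h2⟩; omega)]
      have hz : np.toNat = 0 := by omega
      simp [hz]


-- Main assembly: both ports reduce to a membership in a take of the yellow-position
-- list; A via pv_aLoop_char, B via pv_enum_filter.
theorem pv_main (guess : String) (letter_i : Int) (answer : String)
    (hlen : guess.toList.length = answer.toList.length)
    (hrange : PySem.Raise.InRange guess.toList.length letter_i) :
    is_viable_duplicate guess letter_i answer = is_viable_duplicate_alt guess letter_i answer := by
  obtain ⟨hlo, hhi⟩ := hrange
  have hne : PySem.Str.pyGet? guess letter_i ≠ none := by
    simp only [PySem.Str.pyGet?_eq, PySem.Chars.pyGet?_eq_listPyGet?, ne_eq,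
      PySem.List.pyGet?_eq_none_iff]
    intro hc
    exact hc ⟨hlo, hhi⟩
  obtain ⟨dup, hdup⟩ := Option.ne_none_iff_exists'.mp hne
  have hlen' : ¬ guess.toList.length ≠ answer.toList.length := fun h => h hlen
  simp only [is_viable_duplicate, is_viable_duplicate_alt, n_greens_with_letter,
    hdup, if_neg hlen']
  -- the two n_greens values coincide
  have hng : (List.range guess.toList.length).foldl
      (fun c i => if guess.toList.getD i ' ' == dup && answer.toList.getD i ' ' == dup
        then c + 1 else c) (0 : Int)
      = ((((guess.toList.zip answer.toList)).filter
          (fun p => p.1 == dup && p.2 == dup)).length : Int) := by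
    rw [PySem.List.foldl_if_add_one, pv_count_range_eq_zip dup _ _ hlen]
    ring
  rw [hng]
  set np : Int := (PySem.List.count answer.toList dup : Int)
    - ((((guess.toList.zip answer.toList)).filter
        (fun p => p.1 == dup && p.2 == dup)).length : Int) with hnp
  -- the budget is never negative: greens with dup ≤ occurrences of dup in answer
  have hnp0 : 0 ≤ np := by
    have h1 := pv_greens_le_count dup guess.toList answer.toList
    have h2 : PySem.List.count answer.toList dup = answer.toList.count dup :=
      PySem.List.count_eq answer.toList dup
    omega
  rw [PySem.List.slice_to _ hnp0]
  -- B's yellow-position list as a filtered index range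
  have hY := pv_enum_filter (fun p : Char × Char => p.1 == dup && p.2 != dup)
    (guess.toList.zip answer.toList) 0
  rw [Nat.cast_zero] at hY
  rw [hY]
  have hzlen : (guess.toList.zip answer.toList).length = guess.toList.length := by
    rw [List.length_zip]; omega
  have hfc : (List.range (guess.toList.zip answer.toList).length).filter
        (fun j => (fun p : Char × Char => p.1 == dup && p.2 != dup)
          ((guess.toList.zip answer.toList).getD j default))
      = (List.range guess.toList.length).filter
        (fun j => guess.toList.getD j ' ' == dup && answer.toList.getD j ' ' != dup) := by
    rw [hzlen]
    refine List.filter_congr (fun j hj => ?_)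
    have hjn : j < guess.toList.length := List.mem_range.mp hj
    have hja : j < answer.toList.length := by omega
    have hz : (guess.toList.zip answer.toList).getD j default
        = (guess.toList[j], answer.toList[j]) := by
      rw [List.getD_eq_getElem _ _ (by rw [hzlen]; exact hjn)]
      exact List.getElem_zip ..
    rw [hz, List.getD_eq_getElem _ _ hjn, List.getD_eq_getElem _ _ hja]
  rw [hfc]
  have hmap : (fun j : Nat => ((0 + j : Nat) : Int)) = (fun j : Nat => (j : Int)) := by
    funext j; simp
  rw [hmap]
  by_cases hneg : letter_i < 0
  · -- loop body never runs; letter_i is negative, every listed position is ≥ 0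
    rw [pv_aLoop, dif_neg (by rintro ⟨h1, h2⟩; omega)]
    symm
    simp only [decide_eq_false_iff_not]
    intro hmem
    obtain ⟨j, hj, hje⟩ := List.mem_map.mp (List.mem_of_mem_take hmem)
    omega
  · have hLt : letter_i = ((letter_i.toNat : Nat) : Int) := by omega
    have hLtlen : letter_i.toNat < guess.toList.length := by omega
    rw [hLt]
    rw [pv_aLoop_char guess.toList answer.toList dup letter_i.toNat hlen hLtlen
      (letter_i.toNat + 1) 0 np (by omega)]
    -- compare membership over range (Lt+1) with membership over the full range
    have hsplit : List.range guess.toList.length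
        = List.range' 0 (letter_i.toNat + 1)
          ++ List.range' (letter_i.toNat + 1) (guess.toList.length - (letter_i.toNat + 1)) := by
      have h : List.range' 0 (letter_i.toNat + 1) 1
            ++ List.range' (0 + 1 * (letter_i.toNat + 1))
                (guess.toList.length - (letter_i.toNat + 1)) 1
          = List.range' 0 ((letter_i.toNat + 1)
              + (guess.toList.length - (letter_i.toNat + 1))) 1 := List.range'_append
      rw [show (letter_i.toNat + 1) + (guess.toList.length - (letter_i.toNat + 1))
          = guess.toList.length from by omega] at h
      rw [List.range_eq_range', ← h]
      norm_num
    rw [hsplit, List.filter_append, List.map_append, List.take_append]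
    simp only [decide_eq_decide, List.mem_append]
    constructor
    · exact Or.inl
    · rintro (h | h)
      · exact h
      · exfalso
        obtain ⟨j, hj, hje⟩ := List.mem_map.mp (List.mem_of_mem_take h)
        have hj' := List.mem_range'.mp (List.mem_of_mem_filter hj)
        omega

-- ===== VERDICT (by name: the statement is the Claim_ definition above) =====
theorem is_viable_duplicate_spec : Claim_equal_is_viable_duplicate := by
  intro guess letter_i answer _hdom hpre
  exact pv_main guess letter_i answer hpre.1 hpre.2
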